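-- pv_equiv track=rewrite | github.com/miliar/Code_Jam_Webscraper | solutions_python/Problem_118/804.py | solve
-- ===== SOURCE A (Python) =====
-- def isPalindrome(n):
--     return str(n) == str(n)[::-1]
--
-- def heronSqrt(n):
--     x = (n+1)//2
--     s = set([x])    # avoid infinite loop if not int
--     while x * x != n:
--         x = (x + (n // x)) // 2
--         if x in s:
--             return False    # n is no square
--         s.add(x)
--     return x
--
-- def solve(A, B):
--     y = 0
--     for n in range(A, B+1):
--         if not isPalindrome(n):  # n is no palindrome
--             continue
--
--         x = heronSqrt(n)
--         if x is False:  # n in no square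
--             continue
--
--         if isPalindrome(x):     # all conditions true
--             y += 1
--
--     return y
-- ===== SOURCE B (Python) =====
-- def solve(A, B):
--     # enumerate palindromic roots r with r*r <= B instead of scanning [A, B]
--     def pal(n):
--         s = str(n)
--         return s == s[::-1]
--     y = 0
--     r = 0
--     while r * r <= B:
--         if pal(r):
--             n = r * r
--             if n >= A and pal(n):
--                 y += 1
--         r += 1
--     return y
-- ===== Notes on version B (the rewrite author's own statement) =====
-- stated objective: faster
-- what changed: Instead of scanning every n in [A,B] and running an integer Heron square-root iteration on each palindrome, B enumerates candidate roots r with r*r <= B, squares them, and counts those where both r and r*r are palindromes and r*r >= A; intended as faster (O(sqrt(B)) candidates instead of O(B-A) with a sqrt iteration each) — a timing run measured ~29x median at the largest size on wide ranges, but no gain on small or empty ranges where A does little work.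
import Mathlib
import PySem

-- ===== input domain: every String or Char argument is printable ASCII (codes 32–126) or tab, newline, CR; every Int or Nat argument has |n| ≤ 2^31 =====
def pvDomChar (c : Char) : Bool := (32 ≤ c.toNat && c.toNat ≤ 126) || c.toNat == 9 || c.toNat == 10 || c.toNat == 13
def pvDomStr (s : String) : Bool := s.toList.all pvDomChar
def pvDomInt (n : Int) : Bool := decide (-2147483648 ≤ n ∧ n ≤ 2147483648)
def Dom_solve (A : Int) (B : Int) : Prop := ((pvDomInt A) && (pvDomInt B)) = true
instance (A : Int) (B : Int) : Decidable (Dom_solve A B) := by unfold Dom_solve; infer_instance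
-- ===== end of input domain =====

-- B replaces A's scan of [A,B] (with a Heron integer-sqrt per palindrome) by an
-- enumeration of roots r with r*r ≤ B, counting those with r and r*r palindromic and r*r ≥ A.

-- ===== PORT A =====
-- str(n) == str(n)[::-1]; the step -1 is never 0, so slice? is some and getD "" is exact
def isPalindrome (n : Int) : Bool :=
  PySem.Int.toStr n == (PySem.Str.slice? (PySem.Int.toStr n) none none (-1)).getD ""

-- the while loop of heronSqrt; fuel n.toNat+2 is an upper bound on the iterations
-- actually performed (the set s grows each round and stays inside [1,n]), proved below
-- for the square case; the 0-fuel branch returns none like the cycle branch.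
def heronLoop (n : Int) : Nat → Int → PySem.Set Int → Option Int
  | 0, _, _ => none
  | f+1, x, s =>
    if x * x == n then some x
    else
      let x' := PySem.Int.floordiv (x + PySem.Int.floordiv n x) 2
      if PySem.Set.contains s x' then none
      else heronLoop n f x' (PySem.Set.add s x')

def heronSqrt (n : Int) : Option Int :=
  let x := PySem.Int.floordiv (n + 1) 2
  heronLoop n (n.toNat + 2) x (PySem.Set.ofList [x])

def solve (A : Int) (B : Int) : Int :=
  (PySem.List.pyRange A (B+1) 1).foldl (fun y n =>
    if !(isPalindrome n) then y
    else match heronSqrt n with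
      | none => y
      | some x => if isPalindrome x then y + 1 else y) 0

-- ===== PORT B =====
def pal (n : Int) : Bool :=
  PySem.Int.toStr n == (PySem.Str.slice? (PySem.Int.toStr n) none none (-1)).getD ""

def altLoop (A : Int) (B : Int) (r : Int) (y : Int) : Int :=
  if h : r * r ≤ B then
    altLoop A B (r + 1)
      (if pal r then (if decide (A ≤ r * r) && pal (r * r) then y + 1 else y) else y)
  else y
termination_by (B + 1 - r).toNat
decreasing_by
  have hr : r ≤ r * r := by nlinarith [mul_self_nonneg (2*r - 1)]
  omega

def solve_alt (A : Int) (B : Int) : Int := altLoop A B 0 0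

-- ===== PRECONDITION & SPEC =====
def Spec_solve (A : Int) (B : Int) (out : Int) : Prop := out = solve_alt A B
instance (A : Int) (B : Int) (out : Int) : Decidable (Spec_solve A B out) := by unfold Spec_solve; infer_instance

-- ===== CLAIM (what is proved, stated in full; the proofs are below) =====
def Claim_equal_solve : Prop := ∀ (A : Int) (B : Int), Dom_solve A B → Spec_solve A B (solve A B)

-- ===== LEMMAS AND PROOFS =====

-- r ≤ r*r over ℤ
lemma int_le_mul_self (r : Int) : r ≤ r * r := by nlinarith [mul_self_nonneg (2*r - 1)]

-- the per-n test of A's loop body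
def indA (n : Int) : Bool :=
  isPalindrome n && (match heronSqrt n with | some x => isPalindrome x | none => false)

-- the per-r test of B's loop body (without the range test r*r ≤ B)
def indB (A : Int) (r : Int) : Bool :=
  pal r && (decide (A ≤ r * r) && pal (r * r))

lemma pal_eq_isPalindrome : pal = isPalindrome := rfl

-- heronLoop can only return `some x'` via its exit test, so x'*x' = n
lemma heronLoop_some_sq (n : Int) : ∀ (f : Nat) (x : Int) (s : PySem.Set Int) (x' : Int),
    heronLoop n f x s = some x' → x' * x' = n := by
  intro f
  induction f with
  | zero => intro x s x' h; simp [heronLoop] at h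
  | succ f ih =>
    intro x s x' h
    rw [heronLoop] at h
    by_cases hx : x * x = n
    · simp [hx] at h; rw [← h]; exact hx
    · simp only [beq_iff_eq, hx, if_false] at h
      split at h
      · exact absurd h (by simp)
      · exact ih _ _ _ h

-- invariant: for n ≥ 1 the iterate stays ≥ 1
lemma heronLoop_some_pos (n : Int) (hn : 1 ≤ n) : ∀ (f : Nat) (x : Int) (s : PySem.Set Int) (x' : Int),
    1 ≤ x → heronLoop n f x s = some x' → 1 ≤ x' := by
  intro f
  induction f with
  | zero => intro x s x' _ h; simp [heronLoop] at h
  | succ f ih =>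
    intro x s x' hx h
    rw [heronLoop] at h
    by_cases hxx : x * x = n
    · simp [hxx] at h; omega
    · simp only [beq_iff_eq, hxx, if_false] at h
      split at h
      · exact absurd h (by simp)
      · refine ih _ _ _ ?_ h
        rw [PySem.Int.floordiv_eq_ediv_of_pos (by omega : (0:Int) < x),
            PySem.Int.floordiv_eq_ediv_of_pos (by norm_num : (0:Int) < 2)]
        have hq : 0 ≤ n / x := Int.ediv_nonneg (by omega) (by omega)
        have h1 : 1 ≤ n / x ∨ 2 ≤ x := by
          rcases (by omega : x = 1 ∨ 2 ≤ x) with h1 | h1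
          · left; rw [h1]; simpa using hn
          · right; exact h1
        omega

-- characterization of a successful heronSqrt
lemma heronSqrt_some (n : Int) (x' : Int) (h : heronSqrt n = some x') :
    x' * x' = n ∧ 0 ≤ x' := by
  have hsq := heronLoop_some_sq n _ _ _ _ h
  refine ⟨hsq, ?_⟩
  have hn0 : 0 ≤ n := hsq ▸ mul_self_nonneg x'
  by_cases hn : n = 0
  · subst hn
    have : x' = 0 := by nlinarith
    omega
  · have hn1 : 1 ≤ n := by omega
    unfold heronSqrt at h
    have hx0 : 1 ≤ PySem.Int.floordiv (n + 1) 2 := by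
      rw [PySem.Int.floordiv_eq_ediv_of_pos (by norm_num : (0:Int) < 2)]
      omega
    have := heronLoop_some_pos n hn1 _ _ _ x' hx0 h
    omega

-- one Heron step from x > r ≥ 0 on n = r*r: the new iterate x' satisfies r ≤ x' < x
lemma heron_step_bounds (r x : Int) (hr : 0 ≤ r) (hx : r < x) :
    r ≤ PySem.Int.floordiv (x + PySem.Int.floordiv (r*r) x) 2 ∧
    PySem.Int.floordiv (x + PySem.Int.floordiv (r*r) x) 2 < x := by
  have hxpos : (0:Int) < x := by omega
  rw [PySem.Int.floordiv_eq_ediv_of_pos hxpos,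
      PySem.Int.floordiv_eq_ediv_of_pos (by norm_num : (0:Int) < 2)]
  set q := r * r / x with hq
  have hmod := Int.ediv_add_emod (r*r) x
  have hm0 : 0 ≤ r*r % x := Int.emod_nonneg _ (by omega)
  have hm1 : r*r % x < x := Int.emod_lt_of_pos _ hxpos
  -- lower bound: x + q ≥ 2r  (from x*(x+q) = x² + r² - m > x*(2r-1))
  have hlow : 2*r ≤ x + q := by
    by_contra hcon
    push_neg at hcon
    have hle : x + q ≤ 2*r - 1 := by omega
    have hmul : x * (x + q) ≤ x * (2*r - 1) :=
      mul_le_mul_of_nonneg_left hle (by omega)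
    nlinarith [mul_self_nonneg (x - r)]
  -- upper bound: q < x since r*r < x*x
  have hqlt : q < x := Int.ediv_lt_of_lt_mul hxpos (by nlinarith)
  omega

-- on a perfect square r*r (0 ≤ r ≤ x), with all set elements ≥ x, the loop returns r
lemma heronLoop_sq (r : Int) (hr : 0 ≤ r) : ∀ (k : Nat) (x : Int) (s : PySem.Set Int),
    r ≤ x → (x - r).toNat ≤ k → (∀ e ∈ s, x ≤ e) →
    heronLoop (r*r) (k+1) x s = some r := by
  intro k
  induction k with
  | zero =>
    intro x s hrx hk _
    have hx : x = r := by omega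
    subst hx
    rw [heronLoop]
    simp
  | succ k ih =>
    intro x s hrx hk hs
    rw [heronLoop]
    by_cases hxx : x * x = r * r
    · have : x = r := by nlinarith
      simp [hxx, this]
    · have hlt : r < x := by
        rcases eq_or_lt_of_le hrx with h | h
        · exact absurd (h ▸ rfl) hxx
        · exact h
      obtain ⟨hb1, hb2⟩ := heron_step_bounds r x hr hlt
      simp only [beq_iff_eq, hxx, if_false]
      have hnotmem : ¬ PySem.Set.contains s (PySem.Int.floordiv (x + PySem.Int.floordiv (r*r) x) 2) = true := by
        rw [PySem.Set.contains_iff]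
        intro hmem
        have := hs _ hmem
        omega
      rw [if_neg hnotmem]
      refine ih _ _ hb1 (by omega) ?_
      intro e he
      rcases (PySem.Set.mem_add _ _ _).mp he with h | h
      · have := hs _ h; omega
      · omega

-- heronSqrt is exact on perfect squares of nonnegative roots
lemma heronSqrt_sq (r : Int) (hr : 0 ≤ r) : heronSqrt (r*r) = some r := by
  unfold heronSqrt
  have hrr : 0 ≤ r * r := mul_self_nonneg r
  have hx0 : PySem.Int.floordiv (r*r + 1) 2 = (r*r + 1) / 2 :=
    PySem.Int.floordiv_eq_ediv_of_pos (by norm_num)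
  have hge : r ≤ PySem.Int.floordiv (r*r + 1) 2 := by
    rw [hx0]
    have : 2*r ≤ r*r + 1 := by nlinarith [mul_self_nonneg (r - 1)]
    omega
  have hle : PySem.Int.floordiv (r*r + 1) 2 ≤ r*r := by rw [hx0]; omega
  have hfuel : (r*r).toNat + 2 = ((r*r).toNat + 1) + 1 := by omega
  rw [hfuel]
  exact heronLoop_sq r hr _ _ _ hge (by omega) (by
    intro e he
    simp [PySem.Set.ofList] at he
    omega)

-- A's loop body is the indA test
lemma body_eq (n y : Int) :
    (if !(isPalindrome n) then y
     else match heronSqrt n with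
       | none => y
       | some x => if isPalindrome x then y + 1 else y)
    = (if indA n then y + 1 else y) := by
  unfold indA
  by_cases hp : isPalindrome n
  · cases hh : heronSqrt n with
    | none => simp [hp, hh]
    | some x =>
      by_cases hpx : isPalindrome x
      · simp [hp, hh, hpx]
      · simp [hp, hh, hpx]
  · simp [hp]

-- A's foldl counts indA over the scanned range
lemma foldl_body_count (l : List Int) : ∀ (y : Int),
    l.foldl (fun y n =>
      if !(isPalindrome n) then y
      else match heronSqrt n with
        | none => y
        | some x => if isPalindrome x then y + 1 else y) y
    = y + (l.countP indA : Int) := by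
  induction l with
  | nil => intro y; simp
  | cons n l ih =>
    intro y
    simp only [List.foldl_cons, List.countP_cons]
    rw [body_eq, ih]
    by_cases h : indA n
    · simp [h]; push_cast; omega
    · simp [h]

lemma solve_eq_count (A B : Int) :
    solve A B = ((PySem.List.pyRange A (B+1) 1).countP indA : Int) := by
  unfold solve
  rw [foldl_body_count]
  omega

-- B's loop counts (r*r ≤ B && indB) over [r, B+1)
lemma altLoop_eq_count (A B : Int) : ∀ (k : Nat) (r y : Int), 0 ≤ r → (B + 1 - r).toNat ≤ k →
    altLoop A B r y
      = y + (((PySem.List.pyRange r (B+1) 1).countP (fun t => decide (t*t ≤ B) && indB A t)) : Int) := by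
  intro k
  induction k with
  | zero =>
    intro r y hr hk
    have hBr : B + 1 ≤ r := by omega
    have hcond : ¬ (r * r ≤ B) := by nlinarith [int_le_mul_self r]
    rw [altLoop, dif_neg hcond, PySem.List.pyRange_one_eq_nil (by omega)]
    simp
  | succ k ih =>
    intro r y hr hk
    rw [altLoop]
    by_cases hcond : r * r ≤ B
    · rw [dif_pos hcond]
      have hrb : r ≤ B := le_trans (int_le_mul_self r) hcond
      rw [PySem.List.pyRange_one_cons (by omega : r < B + 1)]
      rw [ih (r+1) _ (by omega) (by omega)]
      simp only [List.countP_cons]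
      have haddend : (decide (r*r ≤ B) && indB A r)
          = (pal r && (decide (A ≤ r*r) && pal (r*r))) := by
        simp [indB, hcond]
      rw [haddend]
      by_cases h1 : pal r
      · by_cases h2 : (decide (A ≤ r*r) && pal (r*r)) = true
        · simp [h1, h2]; push_cast; omega
        · simp [h1, h2]
      · simp [h1]
    · rw [dif_neg hcond]
      have hz : (PySem.List.pyRange r (B+1) 1).countP (fun t => decide (t*t ≤ B) && indB A t) = 0 := by
        rw [List.countP_eq_zero]
        intro t ht
        have hmem := (PySem.List.mem_pyRange_one).mp ht
        have htt : ¬ (t * t ≤ B) := by nlinarith [hmem.1, hr]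
        simp [htt]
      rw [hz]; simp

-- countP on a nodup list is the card of the filtered toFinset
lemma countP_nodup_toFinset (l : List Int) (hl : l.Nodup) (p : Int → Bool) :
    l.countP p = (l.toFinset.filter (fun x => p x = true)).card := by
  classical
  rw [List.countP_eq_length_filter]
  have hnf : (l.filter p).Nodup := hl.filter p
  rw [← List.toFinset_card_of_nodup hnf]
  congr 1
  ext x
  simp [List.mem_filter]

lemma toFinset_pyRange (a b : Int) : (PySem.List.pyRange a b 1).toFinset = Finset.Ico a b := by
  ext x
  simp [PySem.List.mem_pyRange_one]

-- the root ↦ square bijection between B's counted roots and A's counted palindromes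
lemma count_bij (A B : Int) :
    ((PySem.List.pyRange 0 (B+1) 1).countP (fun t => decide (t*t ≤ B) && indB A t))
      = (PySem.List.pyRange A (B+1) 1).countP indA := by
  classical
  rw [countP_nodup_toFinset _ (PySem.List.nodup_pyRange_one _ _),
      countP_nodup_toFinset _ (PySem.List.nodup_pyRange_one _ _)]
  rw [toFinset_pyRange, toFinset_pyRange]
  refine Finset.card_bij (fun r _ => r * r) ?_ ?_ ?_
  · -- maps into the target filter
    intro r hrmem
    simp only [Finset.mem_filter, Finset.mem_Ico] at hrmem ⊢
    obtain ⟨⟨hr0, _⟩, hp⟩ := hrmem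
    simp only [Bool.and_eq_true, decide_eq_true_eq] at hp
    obtain ⟨hrB, hpal⟩ := hp
    unfold indB at hpal
    simp only [Bool.and_eq_true, decide_eq_true_eq] at hpal
    obtain ⟨hpr, hAr, hprr⟩ := hpal
    refine ⟨⟨hAr, by omega⟩, ?_⟩
    unfold indA
    rw [heronSqrt_sq r hr0]
    rw [pal_eq_isPalindrome] at hpr hprr
    simp [hprr, hpr]
  · -- injective
    intro r1 h1 r2 h2 heq
    simp only [Finset.mem_filter, Finset.mem_Ico] at h1 h2
    nlinarith [h1.1.1, h2.1.1]
  · -- surjective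
    intro n hn
    simp only [Finset.mem_filter, Finset.mem_Ico] at hn
    obtain ⟨⟨hAn, hnB⟩, hind⟩ := hn
    unfold indA at hind
    simp only [Bool.and_eq_true] at hind
    obtain ⟨hpn, hrest⟩ := hind
    cases hh : heronSqrt n with
    | none => rw [hh] at hrest; simp at hrest
    | some x =>
      rw [hh] at hrest
      obtain ⟨hxx, hx0⟩ := heronSqrt_some n x hh
      refine ⟨x, ?_, by omega⟩
      simp only [Finset.mem_filter, Finset.mem_Ico]
      have hxB : x ≤ B := le_trans (int_le_mul_self x) (by omega)
      refine ⟨⟨hx0, by omega⟩, ?_⟩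
      simp only [Bool.and_eq_true, decide_eq_true_eq]
      refine ⟨by omega, ?_⟩
      unfold indB
      simp only at hrest
      rw [pal_eq_isPalindrome, hxx]
      simp only [hpn, hrest, Bool.and_true, Bool.true_and, decide_eq_true_eq]
      omega

-- ===== VERDICT (by name: the statement is the Claim_ definition above) =====
theorem solve_spec : Claim_equal_solve := by
  intro A B _
  unfold Spec_solve
  rw [solve_eq_count]
  unfold solve_alt
  rw [altLoop_eq_count A B ((B+1).toNat) 0 0 le_rfl (by omega)]
  rw [count_bij]
  omega
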